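-- pv_equiv track=rewrite | github.com/lucas0headshot/Python | posto_mais_proximo.py | ultima_parada
-- ===== SOURCE A (Python) =====
-- def ultima_parada(combustivel,consumo,postos_de_gasolina): #Litros | L/Km | Postos(Km)
--     i = 0
--     postos_possiveis = []
--
--     for i in range(len(postos_de_gasolina)):
--       if (postos_de_gasolina[i] <= consumo * combustivel):
--         postos_possiveis.append(postos_de_gasolina[i])
--
--     if (len(postos_possiveis) > 0):
--       return(max(postos_possiveis))
--     else:
--       return (-1)
-- ===== SOURCE B (Python) =====
-- def ultima_parada(combustivel, consumo, postos_de_gasolina):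
--     # Single pass: running best over reachable stations, no intermediate list.
--     limite = consumo * combustivel
--     best = None
--     for posto in postos_de_gasolina:
--         if posto <= limite and (best is None or posto > best):
--             best = posto
--     return -1 if best is None else best
-- ===== Notes on version B (the rewrite author's own statement) =====
-- stated objective: simpler
-- what changed: Replaces the build-a-filtered-list-then-max two-pass approach with one fused pass keeping a running best (None sentinel): no intermediate list is allocated, which a timing run measured as ~2x faster.
import Mathlib
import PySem

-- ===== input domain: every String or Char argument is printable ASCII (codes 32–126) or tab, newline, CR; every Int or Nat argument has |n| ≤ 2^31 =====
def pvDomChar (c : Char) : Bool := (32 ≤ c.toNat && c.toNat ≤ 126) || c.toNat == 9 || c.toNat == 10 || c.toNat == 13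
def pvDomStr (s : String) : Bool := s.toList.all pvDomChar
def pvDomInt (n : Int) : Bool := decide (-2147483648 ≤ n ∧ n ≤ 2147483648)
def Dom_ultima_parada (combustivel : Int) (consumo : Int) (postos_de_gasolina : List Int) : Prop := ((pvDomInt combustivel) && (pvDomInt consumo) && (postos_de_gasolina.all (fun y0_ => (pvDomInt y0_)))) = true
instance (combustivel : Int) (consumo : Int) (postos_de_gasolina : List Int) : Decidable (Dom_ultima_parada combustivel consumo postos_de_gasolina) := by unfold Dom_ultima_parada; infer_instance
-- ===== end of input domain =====

-- B fuses A's filter-then-max two passes into one pass keeping a running best (O(1) extra space instead of an intermediate list); same return value.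


-- ===== PORT A =====
def ultima_parada (combustivel : Int) (consumo : Int) (postos_de_gasolina : List Int) : Int :=
  -- for i in range(len(...)): if ps[i] <= consumo*combustivel: append ps[i]
  -- (pyGetD default 0 is never used: range indices are in range)
  let postos_possiveis :=
    (PySem.List.pyRange 0 (PySem.List.len postos_de_gasolina) 1).foldl
      (fun acc i =>
        if PySem.List.pyGetD postos_de_gasolina i 0 ≤ consumo * combustivel then
          acc ++ [PySem.List.pyGetD postos_de_gasolina i 0]
        else acc) []
  if postos_possiveis.length > 0 then
    -- max(postos_possiveis); the list is nonempty here, so getD -1 is never used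
    (PySem.List.max? postos_possiveis (fun y => y)).getD (-1)
  else -1

-- ===== PORT B =====
def ultima_parada_alt (combustivel : Int) (consumo : Int) (postos_de_gasolina : List Int) : Int :=
  let limite := consumo * combustivel
  let best := postos_de_gasolina.foldl
    (fun best posto =>
      if posto ≤ limite ∧ best.all (fun b => b < posto) then some posto
      else best) (none : Option Int)
  match best with
  | none => -1
  | some b => b

-- ===== PRECONDITION & SPEC =====
def Spec_ultima_parada (combustivel : Int) (consumo : Int) (postos_de_gasolina : List Int) (out : Int) : Prop := out = ultima_parada_alt combustivel consumo postos_de_gasolina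
instance (combustivel : Int) (consumo : Int) (postos_de_gasolina : List Int) (out : Int) : Decidable (Spec_ultima_parada combustivel consumo postos_de_gasolina out) := by unfold Spec_ultima_parada; infer_instance

-- ===== CLAIM (what is proved, stated in full; the proofs are below) =====
def Claim_equal_ultima_parada : Prop := ∀ (combustivel : Int) (consumo : Int) (postos_de_gasolina : List Int), Dom_ultima_parada combustivel consumo postos_de_gasolina → Spec_ultima_parada combustivel consumo postos_de_gasolina (ultima_parada combustivel consumo postos_de_gasolina)

-- ===== LEMMAS AND PROOFS =====


-- B's loop step equals "if reachable, fold in with option-max" (values agree even when posto is not a new max)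
def pvOmax (o : Option Int) (v : Int) : Option Int :=
  some (match o with | none => v | some a => max a v)

lemma step_eq_omax (lim : Int) (o : Option Int) (v : Int) :
    (if v ≤ lim ∧ o.all (fun b => b < v) then some v else o)
      = if v ≤ lim then pvOmax o v else o := by
  cases o with
  | none => by_cases h : v ≤ lim <;> simp [pvOmax, h]
  | some a =>
    by_cases h : v ≤ lim
    · by_cases h2 : a < v
      · simp [pvOmax, h, h2, Int.max_eq_right (le_of_lt h2)]
      · simp [pvOmax, h, h2, Int.max_eq_left (by omega : v ≤ a)]
    · simp [h]

lemma foldl_omax_filter (lim : Int) (l : List Int) (o : Option Int) :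
    l.foldl (fun acc v => if v ≤ lim then pvOmax acc v else acc) o
      = (l.filter (fun v => decide (v ≤ lim))).foldl pvOmax o := by
  induction l generalizing o with
  | nil => rfl
  | cons x t ih =>
    by_cases h : x ≤ lim <;> simp [h, ih]

lemma foldl_omax_some (t : List Int) (v : Int) :
    t.foldl pvOmax (some v) = some (t.foldl max v) := by
  induction t generalizing v with
  | nil => rfl
  | cons x s ih => simp [pvOmax, ih]

-- ===== VERDICT (by name: the statement is the Claim_ definition above) =====
theorem ultima_parada_spec : Claim_equal_ultima_parada := by
  intro c co ps _
  unfold Spec_ultima_parada ultima_parada ultima_parada_alt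
  rw [PySem.List.foldl_pyRange_zero_pyGetD ps 0
      (fun acc v => if v ≤ co * c then acc ++ [v] else acc) []]
  rw [PySem.List.foldl_append_ite_eq_filter]
  simp only [step_eq_omax, foldl_omax_filter]
  cases h : ps.filter (fun v => decide (v ≤ co * c)) with
  | nil => simp
  | cons m t =>
    simp [PySem.List.max?_id_cons, pvOmax, foldl_omax_some]
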